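-- pv_equiv track=rewrite | github.com/pypi-data/pypi-mirror-403 | packages/hestia-earth-models/hestia_earth_models-0.76.2-py3-none-any.whl/hestia_earth/models/hestia/soilMeasurement.py | _get_depths_from_measurements
-- ===== SOURCE A (Python) =====
-- _STANDARD_DEPTHS = {(0, 30), (0, 50)}
--
-- def _get_depths_from_measurements(measurements: list) -> list:
--     needed_depths = list(_STANDARD_DEPTHS)
--     for measurement in measurements:
--         if (
--             measurement.get("depthUpper"),
--             measurement.get("depthLower"),
--         ) in needed_depths:
--             needed_depths.remove(
--                 (int(measurement["depthUpper"]), int(measurement["depthLower"]))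
--             )
--
--     return needed_depths
-- ===== SOURCE B (Python) =====
-- _STANDARD_DEPTHS = {(0, 30), (0, 50)}
--
-- def _get_depths_from_measurements(measurements: list) -> list:
--     def _present(depth):
--         return any(
--             m.get("depthUpper") == depth[0] and m.get("depthLower") == depth[1]
--             for m in measurements
--         )
--     return [d for d in list(_STANDARD_DEPTHS) if not _present(d)]
-- ===== Notes on version B (the rewrite author's own statement) =====
-- stated objective: simpler
-- what changed: A makes one scan over the measurements mutating a shrinking 'needed' list (membership test + remove); B inverts the loops: for each standard depth pair it asks with any() whether some measurement carries exactly that pair, and keeps the pairs with no match — no mutation at all.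
import Mathlib
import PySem

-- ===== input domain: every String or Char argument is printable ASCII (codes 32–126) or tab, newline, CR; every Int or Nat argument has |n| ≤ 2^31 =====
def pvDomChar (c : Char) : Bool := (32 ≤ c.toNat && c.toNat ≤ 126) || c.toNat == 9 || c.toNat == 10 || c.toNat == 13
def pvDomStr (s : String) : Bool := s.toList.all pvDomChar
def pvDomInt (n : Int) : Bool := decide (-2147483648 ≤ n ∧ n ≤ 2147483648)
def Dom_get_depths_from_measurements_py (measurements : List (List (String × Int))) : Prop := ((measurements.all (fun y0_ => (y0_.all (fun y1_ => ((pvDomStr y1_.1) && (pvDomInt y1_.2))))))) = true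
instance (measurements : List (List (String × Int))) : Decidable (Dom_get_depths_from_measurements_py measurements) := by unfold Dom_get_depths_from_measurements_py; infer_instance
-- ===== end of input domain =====

-- B inverts the loops: instead of A's single mutating scan over the measurements that
-- removes pairs from a 'needed' list, B asks for each standard depth pair whether any
-- measurement carries it, and keeps the pairs with no match (objective: simpler).

-- m.get(k): dict modelled as assoc list, lookup = first match (exact for Python dict.get)
def pvGet (m : List (String × Int)) (k : String) : Option Int :=
  (m.find? (fun p => p.1 == k)).map (·.2)

-- ===== PORT A =====
-- loop body: if (m.get("depthUpper"), m.get("depthLower")) in needed_depths: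
--   needed_depths.remove((int(..), int(..)))  (int() is identity on the Int values; a pair
--   of .get results equals a pair of ints in Python iff both gets returned those ints)
def pvStepA (needed : List (Int × Int)) (m : List (String × Int)) : List (Int × Int) :=
  match pvGet m "depthUpper", pvGet m "depthLower" with
  | some u, some l =>
      if needed.contains (u, l) then (PySem.List.remove? needed (u, l)).getD needed
      else needed
  | _, _ => needed

def get_depths_from_measurements_py (measurements : List (List (String × Int))) : List (Int × Int) :=
  measurements.foldl pvStepA [(0, 30), (0, 50)]   -- list(_STANDARD_DEPTHS)

-- ===== PORT B =====
-- helper _present(depth): any(m.get("depthUpper") == depth[0] and m.get("depthLower") == depth[1])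
-- (in Python the .get result equals the int iff it is that stored int; None == int is False)
def pvPresent (measurements : List (List (String × Int))) (d : Int × Int) : Bool :=
  measurements.any (fun m => pvGet m "depthUpper" == some d.1 && pvGet m "depthLower" == some d.2)

def get_depths_from_measurements_py_alt (measurements : List (List (String × Int))) : List (Int × Int) :=
  [((0 : Int), (30 : Int)), (0, 50)].filter (fun d => !(pvPresent measurements d))

-- ===== PRECONDITION & SPEC =====
def Spec_get_depths_from_measurements_py (measurements : List (List (String × Int))) (out : List (Int × Int)) : Prop := out = get_depths_from_measurements_py_alt measurements
instance (measurements : List (List (String × Int))) (out : List (Int × Int)) : Decidable (Spec_get_depths_from_measurements_py measurements out) := by unfold Spec_get_depths_from_measurements_py; infer_instance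

-- ===== CLAIM (what is proved, stated in full; the proofs are below) =====
def Claim_equal_get_depths_from_measurements_py : Prop := ∀ (measurements : List (List (String × Int))), Dom_get_depths_from_measurements_py measurements → Spec_get_depths_from_measurements_py measurements (get_depths_from_measurements_py measurements)

-- ===== LEMMAS AND PROOFS =====

-- the boolean test B applies to one measurement, phrased against A's removal pair
lemma pvPoint (u l : Int) (d : Int × Int) (p : Bool) :
    (!((some u == some d.1 && some l == some d.2) || p)) = ((d != (u, l)) && !p) := by
  cases d with
  | mk a b =>
    by_cases h1 : u = a <;> by_cases h2 : l = b <;>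
      simp [h1, h2, bne, beq_eq_decide, Prod.ext_iff, eq_comm]

-- A's fold from any duplicate-free 'needed' list equals that list filtered by B's
-- "some measurement carries this pair" test: a pair is removed by A exactly once,
-- namely iff some measurement matches it.
lemma pvLoop_inv (ms : List (List (String × Int))) :
    ∀ needed : List (Int × Int), needed.Nodup →
    ms.foldl pvStepA needed = needed.filter (fun d => !(pvPresent ms d)) := by
  induction ms with
  | nil => intro needed _; simp [pvPresent]
  | cons m ms ih =>
    intro needed hnd
    have hsplit : ∀ d, pvPresent (m :: ms) d =
        ((pvGet m "depthUpper" == some d.1 && pvGet m "depthLower" == some d.2) || pvPresent ms d) := by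
      intro d; simp [pvPresent]
    cases hu : pvGet m "depthUpper" with
    | none =>
      have hstep : pvStepA needed m = needed := by simp [pvStepA, hu]
      simp only [List.foldl_cons, hstep, ih needed hnd]
      refine List.filter_congr ?_
      intro d _; simp [hsplit d, hu]
    | some u =>
      cases hl : pvGet m "depthLower" with
      | none =>
        have hstep : pvStepA needed m = needed := by simp [pvStepA, hu, hl]
        simp only [List.foldl_cons, hstep, ih needed hnd]
        refine List.filter_congr ?_
        intro d _; simp [hsplit d, hu, hl]
      | some l =>
        have hpt : ∀ d ∈ needed, (!(pvPresent (m :: ms) d)) = ((d != (u, l)) && !(pvPresent ms d)) := by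
          intro d _; rw [hsplit d, hu, hl]; exact pvPoint u l d _
        by_cases hmem : (u, l) ∈ needed
        · have hstep : pvStepA needed m = needed.erase (u, l) := by
            simp [pvStepA, hu, hl, List.contains_eq_mem, hmem,
              PySem.List.remove?_eq_some_erase needed (u, l) hmem]
          rw [List.foldl_cons, hstep, ih _ (hnd.erase _), List.filter_congr hpt,
            hnd.erase_eq_filter, List.filter_filter]
          refine List.filter_congr ?_
          intro d _; exact Bool.and_comm _ _
        · have hstep : pvStepA needed m = needed := by
            simp [pvStepA, hu, hl, List.contains_eq_mem, hmem]
          rw [List.foldl_cons, hstep, ih needed hnd, List.filter_congr hpt]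
          refine List.filter_congr ?_
          intro d hd
          have hne : d ≠ (u, l) := fun h => hmem (h ▸ hd)
          simp [bne, hne]

-- ===== VERDICT (by name: the statement is the Claim_ definition above) =====
theorem get_depths_from_measurements_py_spec : Claim_equal_get_depths_from_measurements_py := by
  intro ms _
  unfold Spec_get_depths_from_measurements_py get_depths_from_measurements_py
    get_depths_from_measurements_py_alt
  exact pvLoop_inv ms [(0, 30), (0, 50)] (by decide)
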